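-- pv_equiv track=rewrite | github.com/jingluo19877-gif/WeaveMind | MLLM_L3/Home.py | get_personality
-- ===== SOURCE A (Python) =====
-- def get_personality(test_result):
--     personalities = {
--         range(5, 7): "创新匠人",
--         range(7, 9): "传承领袖",
--         range(9, 11): "学术研习者",
--         range(11, 13): "艺术表现者",
--         range(13, 15): "人文关怀者",
--         range(15, 17): "探索冒险家",
--         range(17, 19): "逻辑解析者",
--         range(19, 20): "协调融合者",
--         range(20, 21): "实效实践者"
--     }
--     for score_range, personality in personalities.items():
--         if test_result in score_range:
--             return personality
--     return "未知"
-- ===== SOURCE B (Python) =====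
-- _PAIR_LABELS = ["创新匠人", "传承领袖", "学术研习者", "艺术表现者",
--                 "人文关怀者", "探索冒险家", "逻辑解析者"]
--
-- def get_personality(test_result):
--     if 5 <= test_result <= 18:
--         return _PAIR_LABELS[(test_result - 5) // 2]
--     if test_result == 19:
--         return "协调融合者"
--     if test_result == 20:
--         return "实效实践者"
--     return "未知"
-- ===== Notes on version B (the rewrite author's own statement) =====
-- stated objective: simpler
-- what changed: Replaces the scan over a dict of range buckets with arithmetic indexing: scores 5-18 map to a label list via (score-5)//2, plus two equality checks for 19 and 20.
import Mathlib
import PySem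

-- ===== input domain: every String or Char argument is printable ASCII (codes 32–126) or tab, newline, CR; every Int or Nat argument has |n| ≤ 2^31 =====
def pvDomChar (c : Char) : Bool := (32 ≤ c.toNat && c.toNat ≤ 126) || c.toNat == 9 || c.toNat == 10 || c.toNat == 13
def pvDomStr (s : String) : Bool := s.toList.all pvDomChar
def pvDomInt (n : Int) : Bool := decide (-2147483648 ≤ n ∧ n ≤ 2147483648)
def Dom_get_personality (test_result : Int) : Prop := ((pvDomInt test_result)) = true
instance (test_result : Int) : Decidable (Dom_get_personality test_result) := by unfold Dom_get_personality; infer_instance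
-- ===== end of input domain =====

-- B replaces A's scan over range buckets with O(1) arithmetic indexing into a label list (objective: simpler).


-- ===== PORT A =====
-- loop over the dict's (range, label) items, returning the first label whose range contains test_result
def pvLoopA (t : Int) : List ((Int × Int) × String) → String
  | [] => "未知"
  | ((lo, hi), p) :: rest => if lo ≤ t ∧ t < hi then p else pvLoopA t rest

def get_personality (test_result : Int) : String :=
  pvLoopA test_result
    [((5, 7), "创新匠人"), ((7, 9), "传承领袖"), ((9, 11), "学术研习者"),
     ((11, 13), "艺术表现者"), ((13, 15), "人文关怀者"), ((15, 17), "探索冒险家"),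
     ((17, 19), "逻辑解析者"), ((19, 20), "协调融合者"), ((20, 21), "实效实践者")]

-- ===== PORT B =====
def pvPairLabels : List String :=
  ["创新匠人", "传承领袖", "学术研习者", "艺术表现者", "人文关怀者", "探索冒险家", "逻辑解析者"]

-- the guard 5 ≤ t ≤ 18 keeps the index (t-5)//2 in range 0..6, so the getD default is unreachable
def get_personality_alt (test_result : Int) : String :=
  if 5 ≤ test_result ∧ test_result ≤ 18 then
    (PySem.List.pyGet? pvPairLabels (PySem.Int.floordiv (test_result - 5) 2)).getD "未知"
  else if test_result = 19 then "协调融合者"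
  else if test_result = 20 then "实效实践者"
  else "未知"

-- ===== PRECONDITION & SPEC =====
def Spec_get_personality (test_result : Int) (out : String) : Prop := out = get_personality_alt test_result
instance (test_result : Int) (out : String) : Decidable (Spec_get_personality test_result out) := by unfold Spec_get_personality; infer_instance

-- ===== CLAIM (what is proved, stated in full; the proofs are below) =====
def Claim_equal_get_personality : Prop := ∀ (test_result : Int), Dom_get_personality test_result → Spec_get_personality test_result (get_personality test_result)

-- ===== LEMMAS AND PROOFS =====

-- ===== VERDICT (by name: the statement is the Claim_ definition above) =====
theorem get_personality_spec : Claim_equal_get_personality := by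
  intro t _
  unfold Spec_get_personality
  rcases lt_or_ge t 5 with h5 | h5
  · simp only [get_personality, pvLoopA, get_personality_alt]
    split_ifs <;> first | rfl | omega
  · rcases le_or_gt t 20 with h20 | h20
    · interval_cases t <;> decide
    · simp only [get_personality, pvLoopA, get_personality_alt]
      split_ifs <;> first | rfl | omega
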